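-- pv_equiv track=rewrite | github.com/crazy-djactor/Science_education | q7/1-2.py | Always_2
-- ===== SOURCE A (Python) =====
-- def Always_2(N):
--     if N < 1:
--         return 0
--     s = 0
--     for i in range(N - 1):
--         for j in range(i, N):
--             s = s + j
--     return s
-- ===== SOURCE B (Python) =====
-- def Always_2(N):
--     if N < 1:
--         return 0
--     return (N - 1) * (N * N + N - 3) // 3
-- ===== Notes on version B (the rewrite author's own statement) =====
-- stated objective: faster
-- what changed: Replaced the double nested loop summing indices by a closed-form cubic polynomial (N-1)*(N*N+N-3)//3.
import Mathlib
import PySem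

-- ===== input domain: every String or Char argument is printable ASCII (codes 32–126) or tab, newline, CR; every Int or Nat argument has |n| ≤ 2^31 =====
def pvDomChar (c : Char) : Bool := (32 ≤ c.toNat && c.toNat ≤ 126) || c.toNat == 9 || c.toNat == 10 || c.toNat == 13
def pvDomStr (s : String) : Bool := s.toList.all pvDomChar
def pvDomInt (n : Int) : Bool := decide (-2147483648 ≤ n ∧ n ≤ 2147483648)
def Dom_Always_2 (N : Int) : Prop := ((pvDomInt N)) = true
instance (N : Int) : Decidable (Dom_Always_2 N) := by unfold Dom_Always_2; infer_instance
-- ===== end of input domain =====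

-- B replaces A's O(N^2) double loop by the closed-form polynomial (N-1)*(N*N+N-3)//3 (O(1)).

-- ===== PORT A =====
def Always_2 (N : Int) : Int :=
  if N < 1 then 0
  else
    (PySem.List.pyRange 0 (N - 1) 1).foldl
      (fun s i => (PySem.List.pyRange i N 1).foldl (fun s j => s + j) s) 0

-- ===== PORT B =====
def Always_2_alt (N : Int) : Int :=
  if N < 1 then 0
  else PySem.Int.floordiv ((N - 1) * (N * N + N - 3)) 3

-- ===== PRECONDITION & SPEC =====
def Spec_Always_2 (N : Int) (out : Int) : Prop := out = Always_2_alt N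
instance (N : Int) (out : Int) : Decidable (Spec_Always_2 N out) := by unfold Spec_Always_2; infer_instance

-- ===== CLAIM (what is proved, stated in full; the proofs are below) =====
def Claim_equal_Always_2 : Prop := ∀ (N : Int), Dom_Always_2 N → Spec_Always_2 N (Always_2 N)

-- ===== LEMMAS AND PROOFS =====

-- inner loop: 2 * (sum of range a (a+n) added onto s)
theorem pv_inner (n : Nat) (a s : Int) :
    2 * (PySem.List.pyRange a (a + n) 1).foldl (fun s j => s + j) s
      = 2 * s + n * (2 * a + n - 1) := by
  induction n generalizing s with
  | zero => simp [PySem.List.pyRange_one_eq_nil (le_refl a)]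
  | succ n ih =>
    have h : a ≤ a + (n : Int) := by omega
    have : (a + ((n + 1 : Nat) : Int)) = (a + n) + 1 := by push_cast; ring
    rw [this, PySem.List.pyRange_one_succ_right h, List.foldl_append]
    simp only [List.foldl_cons, List.foldl_nil]
    have := ih s
    push_cast
    push_cast at this
    nlinarith [this]

-- outer loop: 6 * the whole accumulated sum
theorem pv_outer (m : Nat) (N : Int) (h : (m : Int) ≤ N) :
    6 * (PySem.List.pyRange 0 m 1).foldl
        (fun s i => (PySem.List.pyRange i N 1).foldl (fun s j => s + j) s) 0
      = 3 * m * N * (N - 1) - ((m : Int) - 2) * ((m : Int) - 1) * m := by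
  induction m with
  | zero => simp [PySem.List.pyRange_one_eq_nil (le_refl (0 : Int))]
  | succ m ih =>
    have hm : (m : Int) ≤ N := by push_cast at h ⊢; omega
    have h0 : (0 : Int) ≤ (m : Int) := by positivity
    have hcast : ((m + 1 : Nat) : Int) = (m : Int) + 1 := by push_cast; ring
    rw [hcast, PySem.List.pyRange_one_succ_right h0, List.foldl_append]
    simp only [List.foldl_cons, List.foldl_nil]
    -- the last inner loop runs from m to N = m + (N - m).toNat
    have hn : ((N - (m : Int)).toNat : Int) = N - (m : Int) := by
      push_cast at h; omega
    have hinner := pv_inner (N - (m : Int)).toNat (m : Int)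
      ((PySem.List.pyRange 0 (m : Int) 1).foldl
        (fun s i => (PySem.List.pyRange i N 1).foldl (fun s j => s + j) s) 0)
    rw [show (m : Int) + ((N - (m : Int)).toNat : Int) = N by omega] at hinner
    rw [hn] at hinner
    push_cast at h
    nlinarith [ih hm, hinner]

-- ===== VERDICT (by name: the statement is the Claim_ definition above) =====
theorem Always_2_spec : Claim_equal_Always_2 := by
  intro N _
  unfold Spec_Always_2 Always_2 Always_2_alt
  by_cases hN : N < 1
  · simp [hN]
  · simp only [hN, if_false]
    have h1 : (1 : Int) ≤ N := by omega
    have hm : (((N - 1).toNat : Int)) = N - 1 := by omega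
    have hout := pv_outer (N - 1).toNat N (by omega)
    rw [hm] at hout
    set A := (PySem.List.pyRange 0 (N - 1) 1).foldl
        (fun s i => (PySem.List.pyRange i N 1).foldl (fun s j => s + j) s) 0 with hA
    have h3 : (N - 1) * (N * N + N - 3) = 3 * A := by nlinarith [hout]
    rw [h3, PySem.Int.floordiv, Int.mul_fdiv_cancel_left (a := (3:Int)) A (by norm_num)]
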